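-- pv_equiv track=rewrite | github.com/JayCesar/Iniciacao_Cientifica | DouglasPeucker/Python/tests/recovery/recover.py | calculate_canvas_size
-- ===== SOURCE A (Python) =====
-- def calculate_canvas_size(points):
--     min_x = min(point[0] for point in points)
--     max_x = max(point[0] for point in points)
--     min_y = min(point[1] for point in points)
--     max_y = max(point[1] for point in points)
--
--     canvas_width = max_x - min_x + 20  # Add padding of 10 pixels on each side
--     canvas_height = max_y - min_y + 20  # Add padding of 10 pixels on each side
--
--     return canvas_width, canvas_height
-- ===== SOURCE B (Python) =====
-- def calculate_canvas_size(points):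
--     it = iter(points)
--     try:
--         min_x, min_y = next(it)
--     except StopIteration:
--         raise ValueError("min() arg is an empty sequence")
--     max_x, max_y = min_x, min_y
--     for x, y in it:
--         if x < min_x:
--             min_x = x
--         if x > max_x:
--             max_x = x
--         if y < min_y:
--             min_y = y
--         if y > max_y:
--             max_y = y
--     return max_x - min_x + 20, max_y - min_y + 20
-- ===== Notes on version B (the rewrite author's own statement) =====
-- stated objective: alternative
-- what changed: Replaces A's four separate min/max generator passes over the list with a single loop that tracks all four extremes at once, seeded from the first point.
import Mathlib
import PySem

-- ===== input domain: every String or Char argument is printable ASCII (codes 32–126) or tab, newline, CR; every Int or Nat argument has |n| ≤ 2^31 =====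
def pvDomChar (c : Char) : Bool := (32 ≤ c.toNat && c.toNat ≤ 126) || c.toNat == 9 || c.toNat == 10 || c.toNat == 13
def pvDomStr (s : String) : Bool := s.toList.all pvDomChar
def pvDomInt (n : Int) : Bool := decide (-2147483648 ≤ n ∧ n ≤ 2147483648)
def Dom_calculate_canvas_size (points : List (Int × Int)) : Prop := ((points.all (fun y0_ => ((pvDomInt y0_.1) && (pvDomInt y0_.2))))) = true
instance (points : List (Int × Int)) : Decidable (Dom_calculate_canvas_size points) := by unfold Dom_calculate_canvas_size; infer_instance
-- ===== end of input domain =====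

-- B replaces A's four separate min/max passes with one single-pass loop tracking all four extremes (alternative decomposition, same O(n) cost).


-- ===== PORT A =====
-- min()/max() over a generator: PySem.List.min?/max? with the identity key; `getD 0` only
-- makes the port total — Pre_ excludes the empty list, where Python raises ValueError.
def calculate_canvas_size (points : List (Int × Int)) : Int × Int :=
  let min_x := (PySem.List.min? (points.map Prod.fst) (fun y => y)).getD 0
  let max_x := (PySem.List.max? (points.map Prod.fst) (fun y => y)).getD 0
  let min_y := (PySem.List.min? (points.map Prod.snd) (fun y => y)).getD 0
  let max_y := (PySem.List.max? (points.map Prod.snd) (fun y => y)).getD 0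
  let canvas_width := max_x - min_x + 20
  let canvas_height := max_y - min_y + 20
  (canvas_width, canvas_height)

-- ===== PORT B =====
-- the single-pass for-loop of Source B over the remaining points
def altLoop : List (Int × Int) → Int → Int → Int → Int → Int × Int × Int × Int
  | [], min_x, max_x, min_y, max_y => (min_x, max_x, min_y, max_y)
  | (x, y) :: rest, min_x, max_x, min_y, max_y =>
      altLoop rest (if x < min_x then x else min_x) (if x > max_x then x else max_x)
        (if y < min_y then y else min_y) (if y > max_y then y else max_y)

def calculate_canvas_size_alt (points : List (Int × Int)) : Int × Int :=
  match points with
  | [] => (0, 0)  -- Python B raises ValueError here; outside Pre_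
  | (x0, y0) :: rest =>
      let (min_x, max_x, min_y, max_y) := altLoop rest x0 x0 y0 y0
      (max_x - min_x + 20, max_y - min_y + 20)

-- ===== PRECONDITION & SPEC =====
-- Pre_ excludes the empty list, on which both Pythons raise ValueError (min() of empty sequence).
def Pre_calculate_canvas_size (points : List (Int × Int)) : Prop := points ≠ []
instance (points : List (Int × Int)) : Decidable (Pre_calculate_canvas_size points) := by
  unfold Pre_calculate_canvas_size; infer_instance
def pvWitness_calculate_canvas_size : (List (Int × Int)) := [(1, 2), (-3, 4)]
def Spec_calculate_canvas_size (points : List (Int × Int)) (out : Int × Int) : Prop := out = calculate_canvas_size_alt points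
instance (points : List (Int × Int)) (out : Int × Int) : Decidable (Spec_calculate_canvas_size points out) := by unfold Spec_calculate_canvas_size; infer_instance

-- ===== CLAIM (what is proved, stated in full; the proofs are below) =====
def Claim_equal_calculate_canvas_size : Prop := ∀ (points : List (Int × Int)), Dom_calculate_canvas_size points → Pre_calculate_canvas_size points → Spec_calculate_canvas_size points (calculate_canvas_size points)

-- ===== LEMMAS AND PROOFS =====
theorem altLoop_eq (rest : List (Int × Int)) (a b c d : Int) :
    altLoop rest a b c d =
      ((rest.map Prod.fst).foldl min a, (rest.map Prod.fst).foldl max b,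
       (rest.map Prod.snd).foldl min c, (rest.map Prod.snd).foldl max d) := by
  induction rest generalizing a b c d with
  | nil => rfl
  | cons p t ih =>
      obtain ⟨x, y⟩ := p
      have hmin : ∀ u v : Int, (if u < v then u else v) = min v u := by
        intro u v; simp only [min_def]; split_ifs <;> omega
      have hmax : ∀ u v : Int, (if u > v then u else v) = max v u := by
        intro u v; simp only [max_def]; split_ifs <;> omega
      simp only [altLoop, List.map_cons, List.foldl_cons, ih, hmin, hmax]

-- ===== VERDICT (by name: the statement is the Claim_ definition above) =====
theorem calculate_canvas_size_spec : Claim_equal_calculate_canvas_size := by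
  intro points _ hpre
  match points with
  | [] => exact absurd rfl hpre
  | (x0, y0) :: rest =>
      show calculate_canvas_size _ = _
      simp only [calculate_canvas_size, calculate_canvas_size_alt, altLoop_eq,
        List.map_cons, PySem.List.min?_id_cons, PySem.List.max?_id_cons, Option.getD_some]
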